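-- pv_equiv track=rewrite | github.com/AlexandreSAfonso/MyLeetCodesAnswers | HackerRank/_Test findNumOfPairs.py | max_pairs
-- ===== SOURCE A (Python) =====
-- def max_pairs(a, b):
--     # Ordena o array 'a'
--     a.sort()
--
--     # Inicializa o número de pares
--     pairs = 0
--     n = len(a)
--
--     # Itera sobre cada elemento de b
--     for b_val in b:
--         # Procura por um valor em a que seja maior que b_val
--         for i in range(len(a)):
--             if a[i] > b_val:
--                 pairs += 1
--                 # Remove o valor de 'a' usado para o par
--                 a.pop(i)
--                 break
--     return pairs
-- ===== SOURCE B (Python) =====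
-- def max_pairs(a, b):
--     # Sort both lists and count greedy matches with two pointers (does not mutate a, unlike A).
--     a_sorted = sorted(a)
--     count = 0
--     i = 0
--     n = len(a_sorted)
--     for v in sorted(b):
--         while i < n and a_sorted[i] <= v:
--             i += 1
--         if i == n:
--             break
--         count += 1
--         i += 1
--     return count
-- ===== Notes on version B (the rewrite author's own statement) =====
-- stated objective: faster
-- what changed: Replace the per-b linear scan with pop over the mutated sorted list by sorting both lists once and a single two-pointer greedy pass; B also does not mutate the caller's list a.
import Mathlib
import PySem

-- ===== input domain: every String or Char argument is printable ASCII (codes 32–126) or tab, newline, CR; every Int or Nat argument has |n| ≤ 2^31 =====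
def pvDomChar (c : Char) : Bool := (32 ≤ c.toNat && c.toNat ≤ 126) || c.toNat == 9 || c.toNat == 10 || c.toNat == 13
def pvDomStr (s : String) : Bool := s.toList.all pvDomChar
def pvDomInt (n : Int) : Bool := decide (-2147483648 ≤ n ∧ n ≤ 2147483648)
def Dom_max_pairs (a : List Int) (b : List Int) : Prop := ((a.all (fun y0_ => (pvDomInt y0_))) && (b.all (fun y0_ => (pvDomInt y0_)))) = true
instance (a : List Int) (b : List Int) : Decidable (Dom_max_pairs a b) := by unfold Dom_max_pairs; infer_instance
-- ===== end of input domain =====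

-- B sorts both lists once and counts matches in one two-pointer pass instead of A's
-- per-b-element scan-and-pop over the sorted list (asymptotically faster).
-- NOTE on side effects: Python A mutates its argument a in place (sort + pops); B does not.
-- The equivalence proved here is about the RETURN value only.

-- ===== PORT A =====
-- inner loop of A: scan a from index 0, at the first element > v pop it and break;
-- returns the list after the pop, or none if the loop finishes without a match.
-- (scanning a list from the front is exactly `for i in range(len(a)): if a[i] > v: a.pop(i); break`)
def popFG (v : Int) : List Int → Option (List Int)
  | [] => none
  | x :: xs => if x > v then some xs else (popFG v xs).map (fun l => x :: l)

def max_pairs (a : List Int) (b : List Int) : Int :=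
  -- a.sort()
  let a0 := PySem.List.sorted a (fun x => x) false
  -- for b_val in b: inner scan-pop loop, pairs += 1 on a match
  (b.foldl (fun (st : Int × List Int) v =>
      match popFG v st.2 with
      | some a' => (st.1 + 1, a')
      | none => st) (0, a0)).1

-- ===== PORT B =====
-- the two-pointer pass of Source B: the while-loop advancing i over a_sorted past elements ≤ v
-- is the tail-recursive descent in the `else` branch; a successful match advances both.
def twoPointer : List Int → List Int → Int
  | _, [] => 0
  | [], _ :: _ => 0
  | x :: xs, v :: vs => if x > v then 1 + twoPointer xs vs else twoPointer xs (v :: vs)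

def max_pairs_alt (a : List Int) (b : List Int) : Int :=
  twoPointer (PySem.List.sorted a (fun x => x) false) (PySem.List.sorted b (fun x => x) false)

-- ===== PRECONDITION & SPEC =====
def Spec_max_pairs (a : List Int) (b : List Int) (out : Int) : Prop := out = max_pairs_alt a b
instance (a : List Int) (b : List Int) (out : Int) : Decidable (Spec_max_pairs a b out) := by unfold Spec_max_pairs; infer_instance

-- ===== CLAIM (what is proved, stated in full; the proofs are below) =====
def Claim_equal_max_pairs : Prop := ∀ (a : List Int) (b : List Int), Dom_max_pairs a b → Spec_max_pairs a b (max_pairs a b)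

-- ===== LEMMAS AND PROOFS =====

-- A's loop as a structural recursion on b: pop the first element greater than v, count on success.
def greedy : List Int → List Int → Int
  | _, [] => 0
  | a, v :: bs =>
    match popFG v a with
    | some a' => 1 + greedy a' bs
    | none => greedy a bs

lemma foldl_eq_greedy (b : List Int) (a : List Int) (c : Int) :
    (b.foldl (fun (st : Int × List Int) v =>
      match popFG v st.2 with
      | some a' => (st.1 + 1, a')
      | none => st) (c, a)).1 = c + greedy a b := by
  induction b generalizing a c with
  | nil => simp [greedy]
  | cons v bs ih =>
    simp only [List.foldl_cons, greedy]
    cases h : popFG v a with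
    | some a' => simp [ih]; ring
    | none => simp [ih]

lemma max_pairs_eq_greedy (a b : List Int) :
    max_pairs a b = greedy (PySem.List.sorted a (fun x => x) false) b := by
  simpa [max_pairs] using foldl_eq_greedy b (PySem.List.sorted a (fun x => x) false) 0

lemma popFG_subset {v : Int} {a a' : List Int} (h : popFG v a = some a') :
    ∀ x ∈ a', x ∈ a := by
  induction a generalizing a' with
  | nil => simp [popFG] at h
  | cons y ys ih =>
    by_cases hy : y > v
    · simp [popFG, hy] at h
      subst h; intro x hx; exact List.mem_cons_of_mem _ hx
    · simp [popFG, hy] at h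
      obtain ⟨l, hl, rfl⟩ := h
      intro x hx
      rcases List.mem_cons.1 hx with rfl | hx
      · exact List.mem_cons_self
      · exact List.mem_cons_of_mem _ (ih hl x hx)

lemma popFG_sorted {v : Int} {a a' : List Int} (hs : a.Pairwise (· ≤ ·))
    (h : popFG v a = some a') : a'.Pairwise (· ≤ ·) := by
  induction a generalizing a' with
  | nil => simp [popFG] at h
  | cons y ys ih =>
    rcases List.pairwise_cons.1 hs with ⟨hy, hys⟩
    by_cases hgt : y > v
    · simp [popFG, hgt] at h; subst h; exact hys
    · simp [popFG, hgt] at h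
      obtain ⟨l, hl, rfl⟩ := h
      exact List.pairwise_cons.2 ⟨fun x hx => hy x (popFG_subset hl x hx), ih hys hl⟩

-- two pops in a row, with the number of successes; the order of the two pivots does not matter on a sorted list
def popTwo (u v : Int) (a : List Int) : Int × List Int :=
  match popFG u a with
  | none =>
    match popFG v a with
    | none => (0, a)
    | some a1 => (1, a1)
  | some a1 =>
    match popFG v a1 with
    | none => (1, a1)
    | some a2 => (2, a2)

lemma popTwo_comm (u v : Int) (a : List Int) (hs : a.Pairwise (· ≤ ·)) :
    popTwo u v a = popTwo v u a := by
  induction a with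
  | nil => rfl
  | cons x xs ih =>
    rcases List.pairwise_cons.1 hs with ⟨hx, hxs⟩
    by_cases hu : x > u <;> by_cases hv : x > v
    · -- x > u, x > v : first pop removes x either way; the second pop acts on xs,
      -- where every element is ≥ x, hence greater than both u and v
      simp only [popTwo, popFG, if_pos hu, if_pos hv]
      cases xs with
      | nil => rfl
      | cons y ys =>
        have hyu : y > u := lt_of_lt_of_le (by omega : u < x) (hx y List.mem_cons_self)
        have hyv : y > v := lt_of_lt_of_le (by omega : v < x) (hx y List.mem_cons_self)
        simp [popFG, if_pos hyu, if_pos hyv]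
    · -- x > u, x ≤ v
      simp only [popTwo, popFG, if_pos hu, if_neg hv]
      cases h : popFG v xs with
      | none =>
        have : popFG v (x :: xs) = none := by
          simp [popFG, if_neg hv, h]
        simp [this]
      | some l =>
        simp [popFG, if_pos hu]
    · -- x ≤ u, x > v (mirror)
      simp only [popTwo, popFG, if_neg hu, if_pos hv]
      cases h : popFG u xs with
      | none =>
        have : popFG u (x :: xs) = none := by
          simp [popFG, if_neg hu, h]
        simp [this]
      | some l =>
        simp [popFG, if_pos hv]
    · -- x ≤ u, x ≤ v : x is carried along unchanged through every pop
      have key : ∀ w z : Int, ¬ x > w → ¬ x > z →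
          popTwo w z (x :: xs) =
            ((popTwo w z xs).1, x :: (popTwo w z xs).2) := by
        intro w z hw hz
        simp only [popTwo, popFG, if_neg hw]
        cases h1 : popFG w xs with
        | none =>
          simp only [Option.map_none]
          simp only [popFG, if_neg hz]
          cases h2 : popFG z xs with
          | none => simp
          | some l => simp
        | some l =>
          simp only [Option.map_some]
          simp only [popFG, if_neg hz]
          cases h2 : popFG z l with
          | none => simp
          | some l2 => simp
      rw [key u v hu hv, key v u hv hu, ih hxs]

lemma greedy_two (u v : Int) (a bs : List Int) :
    greedy a (u :: v :: bs) = (popTwo u v a).1 + greedy (popTwo u v a).2 bs := by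
  simp only [greedy, popTwo]
  cases h1 : popFG u a with
  | none =>
    cases h2 : popFG v a with
    | none => simp [greedy]
    | some a1 => simp [greedy]
  | some a1 =>
    cases h2 : popFG v a1 with
    | none => simp [greedy, h2]
    | some a2 => simp [greedy, h2]; ring

lemma greedy_perm {b b' : List Int} (p : b.Perm b') :
    ∀ a : List Int, a.Pairwise (· ≤ ·) → greedy a b = greedy a b' := by
  induction p with
  | nil => intro a _; rfl
  | cons v _ ih =>
    intro a hs
    simp only [greedy]
    cases h : popFG v a with
    | none => exact ih a hs
    | some a' =>
      have := ih a' (popFG_sorted hs h)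
      simp [this]
  | swap u v l =>
    intro a hs
    rw [greedy_two v u a l, greedy_two u v a l, popTwo_comm u v a hs]
  | trans p1 p2 ih1 ih2 =>
    intro a hs
    rw [ih1 a hs, ih2 a hs]

lemma greedy_nil_left (b : List Int) : greedy [] b = 0 := by
  induction b with
  | nil => rfl
  | cons v bs ih => simpa [greedy, popFG] using ih

-- a head element that is below every b value is never matched and can be dropped
lemma greedy_drop_low {x : Int} {B : List Int} (h : ∀ w ∈ B, x ≤ w) :
    ∀ a : List Int, greedy (x :: a) B = greedy a B := by
  induction B with
  | nil => intro a; rfl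
  | cons w ws ih =>
    intro a
    have hxw : ¬ x > w := not_lt.2 (h w List.mem_cons_self)
    have hws : ∀ w' ∈ ws, x ≤ w' := fun w' hw' => h w' (List.mem_cons_of_mem _ hw')
    simp only [greedy, popFG, if_neg hxw]
    cases hp : popFG w a with
    | none =>
      simp only [hp, Option.map_none]
      exact ih hws a
    | some a' => simp [ih hws a']

lemma greedy_eq_twoPointer :
    ∀ a bs : List Int, a.Pairwise (· ≤ ·) → bs.Pairwise (· ≤ ·) →
      greedy a bs = twoPointer a bs := by
  intro a
  induction a with
  | nil =>
    intro bs _ _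
    cases bs with
    | nil => rfl
    | cons v vs => simp [greedy_nil_left, twoPointer]
  | cons x xs ih =>
    intro bs hsa hsb
    rcases List.pairwise_cons.1 hsa with ⟨hxle, hxs⟩
    cases bs with
    | nil => rfl
    | cons v vs =>
      rcases List.pairwise_cons.1 hsb with ⟨hvle, hvs⟩
      by_cases hxv : x > v
      · simp only [greedy, popFG, if_pos hxv, twoPointer]
        rw [ih vs hxs hvs]
      · have hlow : ∀ w ∈ v :: vs, x ≤ w := by
          intro w hw
          rcases List.mem_cons.1 hw with rfl | hw
          · exact not_lt.1 hxv
          · exact le_trans (not_lt.1 hxv) (hvle w hw)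
        rw [greedy_drop_low hlow xs]
        simp only [twoPointer, if_neg hxv]
        exact ih (v :: vs) hxs hsb

-- ===== VERDICT (by name: the statement is the Claim_ definition above) =====
theorem max_pairs_spec : Claim_equal_max_pairs := by
  intro a b _
  unfold Spec_max_pairs max_pairs_alt
  rw [max_pairs_eq_greedy]
  have hsa := PySem.List.sorted_pairwise (xs := a) (key := fun x : Int => x)
  have hsb := PySem.List.sorted_pairwise (xs := b) (key := fun x : Int => x)
  rw [greedy_perm (PySem.List.sorted_perm b (fun x => x) false).symm _ hsa]
  exact greedy_eq_twoPointer _ _ hsa hsb
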